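-- pv_equiv track=rewrite | github.com/9oelM/rdsa | problems/programmers.co.kr/best-album.py | solution
-- ===== SOURCE A (Python) =====
-- from typing import List
--
-- def solution(genres : List[str], plays : List[int]) -> List[int]:
--     store = {}
--     rank = {}
--     for gen, play in zip(genres, plays):
--         if gen in rank:
--             rank[gen] += play
--         else:
--             rank[gen] = play
--     combined = sorted([[idx, *(genre, play)] for idx, (genre, play) in enumerate(zip(genres, plays))], key=lambda x : (rank[x[1]], x[1], x[2], -x[0]))
--     answer = []
--     for item in reversed(combined):
--         idx, gen, play = tuple(item)
--         if gen in store: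
--             if store[gen] < 2:
--                 store[gen] += 1
--                 answer.append(idx)
--         else:
--             store[gen] = 1
--             answer.append(idx)
--     return answer
-- ===== SOURCE B (Python) =====
-- from typing import List
--
-- def solution(genres: List[str], plays: List[int]) -> List[int]:
--     # one pass: per-genre total plays and the best two tracks (play desc, index asc)
--     info = {}  # genre -> [total, (play1, idx1), (play2, idx2) or None]
--     for i, (g, p) in enumerate(zip(genres, plays)):
--         e = info.get(g)
--         if e is None:
--             info[g] = [p, (p, i), None]
--         else:
--             e[0] += p
--             if p > e[1][0]:
--                 e[2] = e[1]
--                 e[1] = (p, i)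
--             elif e[2] is None or p > e[2][0]:
--                 e[2] = (p, i)
--     answer = []
--     for g in sorted(info, key=lambda g: (info[g][0], g), reverse=True):
--         _, b1, b2 = info[g]
--         answer.append(b1[1])
--         if b2 is not None:
--             answer.append(b2[1])
--     return answer
-- ===== Notes on version B (the rewrite author's own statement) =====
-- stated objective: faster
-- what changed: A sorts all n tracks by a 4-tuple key and scans the sorted list with a counter dict; B makes one pass accumulating per-genre totals and the best two tracks per genre, then sorts only the distinct genres.
import Mathlib
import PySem

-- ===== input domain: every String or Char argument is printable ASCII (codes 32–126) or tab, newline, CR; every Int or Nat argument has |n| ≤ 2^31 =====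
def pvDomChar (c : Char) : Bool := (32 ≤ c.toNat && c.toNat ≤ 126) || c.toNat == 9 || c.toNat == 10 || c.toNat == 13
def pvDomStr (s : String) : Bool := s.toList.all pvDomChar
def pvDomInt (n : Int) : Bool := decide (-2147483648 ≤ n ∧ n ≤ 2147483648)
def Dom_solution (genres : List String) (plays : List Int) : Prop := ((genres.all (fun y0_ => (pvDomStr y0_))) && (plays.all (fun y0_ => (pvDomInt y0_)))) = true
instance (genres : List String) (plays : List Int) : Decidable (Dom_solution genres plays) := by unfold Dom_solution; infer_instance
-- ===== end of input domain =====

-- B replaces A's sort of all tracks by one pass computing per-genre totals and best-two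
-- tracks, sorting only the distinct genres (objective: faster).

-- ===== PORT A =====
def pvRankDict (zipped : List (String × Int)) : PySem.Dict String Int :=
  zipped.foldl (fun d gp =>
    if d.contains gp.1 then d.insert gp.1 (d.getD gp.1 0 + gp.2)
    else d.insert gp.1 gp.2) PySem.Dict.empty

-- the Python 4-tuple sort key (rank[g], g, play, -idx), compared lexicographically
def pvKeyA (rank : PySem.Dict String Int) (x : Int × String × Int) :
    Lex (Int × Lex (String × Lex (Int × Int))) :=
  toLex (rank.getD x.2.1 0, toLex (x.2.1, toLex (x.2.2, -x.1)))

def pvScanStep (st : PySem.Dict String Int × List Int) (item : Int × String × Int) :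
    PySem.Dict String Int × List Int :=
  if st.1.contains item.2.1 then
    if st.1.getD item.2.1 0 < 2 then
      (st.1.insert item.2.1 (st.1.getD item.2.1 0 + 1), st.2 ++ [item.1])
    else st
  else (st.1.insert item.2.1 1, st.2 ++ [item.1])

def solution (genres : List String) (plays : List Int) : List Int :=
  let zipped := genres.zip plays
  let rank := pvRankDict zipped
  let combined := PySem.List.sorted (PySem.List.enumerate zipped) (pvKeyA rank)
  (combined.reverse.foldl pvScanStep (PySem.Dict.empty, [])).2

-- ===== PORT B =====
-- per-genre state: (total plays, best track (play, idx), second-best track or none)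
def pvStepB (d : PySem.Dict String (Int × (Int × Int) × Option (Int × Int)))
    (x : Int × String × Int) : PySem.Dict String (Int × (Int × Int) × Option (Int × Int)) :=
  match d.get? x.2.1 with
  | none => d.insert x.2.1 (x.2.2, (x.2.2, x.1), none)
  | some e =>
    d.insert x.2.1 (e.1 + x.2.2,
      if e.2.1.1 < x.2.2 then ((x.2.2, x.1), some e.2.1)
      else
        match e.2.2 with
        | none => (e.2.1, some (x.2.2, x.1))
        | some b2 => if b2.1 < x.2.2 then (e.2.1, some (x.2.2, x.1)) else (e.2.1, some b2))

def pvB0 : Int × (Int × Int) × Option (Int × Int) := (0, (0, 0), none)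

def solution_alt (genres : List String) (plays : List Int) : List Int :=
  let info := (PySem.List.enumerate (genres.zip plays)).foldl pvStepB PySem.Dict.empty
  let order := PySem.List.sorted2 info.keys (fun g => (info.getD g pvB0).1) (fun g => g) true
  order.foldl (fun acc g =>
    let e := info.getD g pvB0
    acc ++ [e.2.1.2] ++ (match e.2.2 with | none => [] | some b2 => [b2.2])) []

-- ===== PRECONDITION & SPEC =====
def Spec_solution (genres : List String) (plays : List Int) (out : List Int) : Prop := out = solution_alt genres plays
instance (genres : List String) (plays : List Int) (out : List Int) : Decidable (Spec_solution genres plays out) := by unfold Spec_solution; infer_instance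

-- ===== CLAIM (what is proved, stated in full; the proofs are below) =====
def Claim_equal_solution : Prop := ∀ (genres : List String) (plays : List Int), Dom_solution genres plays → Spec_solution genres plays (solution genres plays)

-- ===== LEMMAS AND PROOFS =====

-- abbreviations used only by the proofs
def pvKP (x : Int × String × Int) : Lex (Int × Int) := toLex (x.2.2, -x.1)
def pvPair (x : Int × String × Int) : Int × Int := (x.2.2, x.1)
def pvLtP (q r : Int × Int) : Prop := toLex (q.1, -q.2) < toLex (r.1, -r.2)
def pvBucket (items : List (Int × String × Int)) (g : String) : List (Int × String × Int) :=
  items.filter (fun x => x.2.1 == g)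
def pvDesc (l : List (Int × String × Int)) : List (Int × String × Int) :=
  (PySem.List.sorted l pvKP).reverse
def pvUpdB (o : Option (Int × (Int × Int) × Option (Int × Int))) (x : Int × String × Int) :
    Int × (Int × Int) × Option (Int × Int) :=
  match o with
  | none => (x.2.2, (x.2.2, x.1), none)
  | some e =>
    (e.1 + x.2.2,
      if e.2.1.1 < x.2.2 then ((x.2.2, x.1), some e.2.1)
      else
        match e.2.2 with
        | none => (e.2.1, some (x.2.2, x.1))
        | some b2 => if b2.1 < x.2.2 then (e.2.1, some (x.2.2, x.1)) else (e.2.1, some b2))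
def pvUpdR (o : Option Int) (p : Int) : Option Int :=
  some (match o with | none => p | some t => t + p)
def pvSpecTop (s : List (Int × Int)) (b1 : Int × Int) (ob2 : Option (Int × Int)) : Prop :=
  (b1 ∈ s ∧ ∀ q ∈ s, q ≠ b1 → pvLtP q b1) ∧
  (match ob2 with
   | none => s.length ≤ 1
   | some b2 => 2 ≤ s.length ∧ b2 ∈ s ∧ b2 ≠ b1 ∧ ∀ q ∈ s, q ≠ b1 → q ≠ b2 → pvLtP q b2)

-- enumerate facts
lemma pv_enum_map_snd {α : Type} (xs : List α) (k : Int) :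
    (PySem.List.enumerate xs k).map (·.2) = xs := by
  induction xs generalizing k with
  | nil => simp [PySem.List.enumerate]
  | cons x t ih => simp [PySem.List.enumerate, ih]

lemma pv_enum_idx_lb {α : Type} (xs : List α) (k : Int) :
    ∀ y ∈ PySem.List.enumerate xs k, k ≤ y.1 := by
  induction xs generalizing k with
  | nil => simp [PySem.List.enumerate]
  | cons x t ih =>
    intro y hy
    simp only [PySem.List.enumerate, List.mem_cons] at hy
    rcases hy with h | h
    · simp [h]
    · have := ih (k + 1) y h; omega

lemma pv_enum_idx_pairwise {α : Type} (xs : List α) (k : Int) :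
    List.Pairwise (fun a b => a.1 < b.1) (PySem.List.enumerate xs k) := by
  induction xs generalizing k with
  | nil => simp [PySem.List.enumerate]
  | cons x t ih =>
    simp only [PySem.List.enumerate]
    refine List.Pairwise.cons ?_ (ih (k + 1))
    intro y hy
    have := pv_enum_idx_lb t (k + 1) y hy
    simp only
    omega

lemma pv_enum_filter_play (Z : List (String × Int)) (k : Int) (g : String) :
    ((PySem.List.enumerate Z k).filter (fun x => x.2.1 == g)).map (fun x => x.2.2)
      = (Z.filter (fun y => y.1 == g)).map (·.2) := by
  induction Z generalizing k with
  | nil => simp [PySem.List.enumerate]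
  | cons y t ih =>
    by_cases hg : y.1 = g
    · simp [PySem.List.enumerate, hg, ih]
    · simp [PySem.List.enumerate, hg, ih]

-- a keyed insert loop, read back at one key
lemma pv_fold_insert_get? {V β : Type} (key : β → String) (upd : Option V → β → V)
    (l : List β) (d : PySem.Dict String V) (g : String) :
    (l.foldl (fun d x => d.insert (key x) (upd (d.get? (key x)) x)) d).get? g
      = (l.filter (fun x => key x == g)).foldl (fun o x => some (upd o x)) (d.get? g) := by
  induction l generalizing d with
  | nil => simp
  | cons x t ih =>
    simp only [List.foldl_cons, List.filter_cons]
    by_cases hg : key x = g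
    · subst hg
      simp only [BEq.rfl, if_pos, List.foldl_cons, ih]
      rw [PySem.Dict.get?_insert_self]
    · have hne : (key x == g) = false := by simp [hg]
      rw [hne]
      simp only [Bool.false_eq_true, if_false, ih]
      rw [PySem.Dict.get?_insert_of_ne _ _ (fun h => hg h.symm)]

lemma pv_rank_shape (Z : List (String × Int)) :
    pvRankDict Z = Z.foldl (fun d y => d.insert y.1 (pvUpdR (d.get? y.1) y.2 |>.getD 0))
      PySem.Dict.empty := by
  unfold pvRankDict
  apply PySem.List.foldl_congr_mem
  intro d y _
  by_cases hc : d.contains y.1 = true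
  · rw [PySem.Dict.contains_eq_isSome_get?] at hc
    obtain ⟨t, ht⟩ := Option.isSome_iff_exists.mp hc
    rw [PySem.Dict.contains_eq_isSome_get?]
    simp [ht, pvUpdR, PySem.Dict.getD_eq_get?_getD]
  · have hn : d.get? y.1 = none := by
      rw [PySem.Dict.get?_eq_none_iff_contains]
      simpa using hc
    simp [hc, hn, pvUpdR]

lemma pv_stepB_shape (d : PySem.Dict String (Int × (Int × Int) × Option (Int × Int)))
    (x : Int × String × Int) : pvStepB d x = d.insert x.2.1 (pvUpdB (d.get? x.2.1) x) := by
  cases h : d.get? x.2.1 <;> simp [pvStepB, pvUpdB, h]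

lemma pv_rank_get? (Z : List (String × Int)) (g : String) :
    (pvRankDict Z).get? g
      = ((Z.filter (fun y => y.1 == g)).map (·.2)).foldl (fun o p => pvUpdR o p) none := by
  rw [pv_rank_shape]
  have h := pv_fold_insert_get? (fun y : String × Int => y.1)
    (fun o y => (pvUpdR o y.2).getD 0) Z PySem.Dict.empty g
  beta_reduce at h
  rw [h, PySem.Dict.get?_empty, List.foldl_map]
  apply PySem.List.foldl_congr_mem
  intro o y _
  cases o <;> rfl

lemma pv_info_get? (items : List (Int × String × Int)) (g : String) :
    (items.foldl pvStepB PySem.Dict.empty).get? g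
      = (pvBucket items g).foldl (fun o x => some (pvUpdB o x)) none := by
  rw [PySem.List.foldl_congr_mem items _
        (fun d x => d.insert x.2.1 (pvUpdB (d.get? x.2.1) x)) _
        (fun d x _ => pv_stepB_shape d x)]
  have h := pv_fold_insert_get? (fun x : Int × String × Int => x.2.1) pvUpdB items
    PySem.Dict.empty g
  beta_reduce at h
  rw [h, PySem.Dict.get?_empty]
  rfl

lemma pv_info_keys (items : List (Int × String × Int)) :
    (items.foldl pvStepB PySem.Dict.empty).keys
      = PySem.Set.ofList (items.map (fun x => x.2.1)) := by
  rw [PySem.List.foldl_congr_mem items _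
        (fun d x => d.insert x.2.1 (pvUpdB (d.get? x.2.1) x)) _
        (fun d x _ => pv_stepB_shape d x)]
  have h := PySem.Dict.keys_foldl_insert_key items (fun x : Int × String × Int => x.2.1)
    (fun d x => pvUpdB (d.get? x.2.1) x) PySem.Dict.empty
  beta_reduce at h
  rw [h, PySem.Dict.keys_empty, PySem.Set.update_nil_left]

-- the total component of B's fold is A's rank fold
lemma pv_totB_proj (l : List (Int × String × Int)) (o : Option (Int × (Int × Int) × Option (Int × Int))) :
    (l.foldl (fun o x => some (pvUpdB o x)) o).map (·.1)
      = (l.map (fun x => x.2.2)).foldl (fun o p => pvUpdR o p) (o.map (·.1)) := by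
  induction l generalizing o with
  | nil => simp
  | cons x t ih =>
    simp only [List.foldl_cons, List.map_cons]
    rw [ih]
    congr 1
    cases o <;> rfl

lemma pv_tot_eq (Z : List (String × Int)) (g : String) :
    (((PySem.List.enumerate Z 0).foldl pvStepB PySem.Dict.empty).getD g pvB0).1
      = (pvRankDict Z).getD g 0 := by
  rw [PySem.Dict.getD_eq_get?_getD, PySem.Dict.getD_eq_get?_getD]
  have h1 := pv_info_get? (PySem.List.enumerate Z 0) g
  have h2 := pv_totB_proj (pvBucket (PySem.List.enumerate Z 0) g) none
  have h3 : (pvBucket (PySem.List.enumerate Z 0) g).map (fun x => x.2.2)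
      = (Z.filter (fun y => y.1 == g)).map (·.2) := pv_enum_filter_play Z 0 g
  have h4 : ((((PySem.List.enumerate Z 0).foldl pvStepB PySem.Dict.empty).get? g).map (·.1))
      = (pvRankDict Z).get? g := by
    rw [h1, h2, h3, pv_rank_get?]
    rfl
  rw [← h4]
  cases (((PySem.List.enumerate Z 0).foldl pvStepB PySem.Dict.empty).get? g) <;> rfl

lemma pv_ltP_trans {a b c : Int × Int} (h1 : pvLtP a b) (h2 : pvLtP b c) : pvLtP a c :=
  lt_trans h1 h2

lemma pv_ltP_asymm {a b : Int × Int} (h1 : pvLtP a b) (h2 : pvLtP b a) : False :=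
  lt_asymm h1 h2

lemma pv_max_unique (t : List (Int × Int)) (b c : Int × Int) (hb : b ∈ t) (hc : c ∈ t)
    (h1 : ∀ q ∈ t, q ≠ b → pvLtP q b) (h2 : ∀ q ∈ t, q ≠ c → pvLtP q c) : b = c := by
  by_contra hne
  exact pv_ltP_asymm (h1 c hc (Ne.symm hne)) (h2 b hb hne)

-- top-2 fold characterization
lemma pv_top2_fold (l : List (Int × String × Int))
    (hl : List.Pairwise (fun a b => a.1 < b.1) l) (hne : l ≠ []) :
    ∃ t b1 ob2, l.foldl (fun o x => some (pvUpdB o x)) none = some (t, b1, ob2) ∧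
      pvSpecTop (l.map pvPair) b1 ob2 := by
  induction l using List.reverseRecOn with
  | nil => exact absurd rfl hne
  | append_singleton l x ih =>
    rw [List.foldl_append, List.foldl_cons, List.foldl_nil, List.map_append]
    by_cases hl0 : l = []
    · subst hl0
      refine ⟨x.2.2, (x.2.2, x.1), none, rfl, ⟨?_, ?_⟩, ?_⟩
      · simp [pvPair]
      · intro q hq hqne
        simp only [List.nil_append, List.map_cons, List.map_nil, List.mem_singleton] at hq
        exact absurd hq hqne
      · simp
    · have hl' : List.Pairwise (fun a b => a.1 < b.1) l :=
        hl.sublist (List.sublist_append_left l [x])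
      obtain ⟨t, b1, ob2, hfold, ⟨hb1mem, hb1max⟩, hS2⟩ := ih hl' hl0
      rw [hfold]
      have hx_gt : ∀ a ∈ l, a.1 < x.1 := by
        have h3 := (List.pairwise_append.mp hl).2.2
        exact fun a ha => h3 a ha x (by simp)
      have hfacts : ∀ q ∈ l.map pvPair,
          (pvLtP q (x.2.2, x.1) ↔ q.1 < x.2.2) ∧ (pvLtP (x.2.2, x.1) q ↔ x.2.2 ≤ q.1)
            ∧ q ≠ (x.2.2, x.1) := by
        intro q hq
        obtain ⟨a, ha, rfl⟩ := List.mem_map.mp hq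
        have hax := hx_gt a ha
        refine ⟨?_, ?_, ?_⟩
        · unfold pvLtP pvPair
          rw [Prod.Lex.toLex_lt_toLex]
          simp only
          omega
        · unfold pvLtP pvPair
          rw [Prod.Lex.toLex_lt_toLex]
          simp only
          omega
        · unfold pvPair
          simp only [ne_eq, Prod.mk.injEq, not_and]
          intro _
          omega
      have hlmem : b1 ∈ l.map pvPair := hb1mem
      have hslen : 1 ≤ l.length := by
        have := List.length_pos_of_mem hlmem
        simpa using this
      by_cases h1 : b1.1 < x.2.2
      · refine ⟨t + x.2.2, (x.2.2, x.1), some b1, by simp [pvUpdB, h1], ⟨?_, ?_⟩, ?_, ?_, ?_, ?_⟩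
        · simp [pvPair]
        · intro q hq hqne
          rcases List.mem_append.mp hq with h | h
          · by_cases hqb1 : q = b1
            · subst hqb1; exact ((hfacts q h).1).mpr h1
            · exact pv_ltP_trans (hb1max q h hqb1) (((hfacts b1 hlmem).1).mpr h1)
          · simp only [List.map_cons, List.map_nil, List.mem_singleton] at h
            exact absurd (h.trans (by simp [pvPair])) hqne
        · simp only [List.length_append, List.length_map, List.map_cons, List.map_nil,
            List.length_cons, List.length_nil]
          omega
        · exact List.mem_append_left _ hlmem
        · exact (hfacts b1 hlmem).2.2
        · intro q hq hqpx hqb1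
          rcases List.mem_append.mp hq with h | h
          · exact hb1max q h hqb1
          · simp only [List.map_cons, List.map_nil, List.mem_singleton] at h
            exact absurd (h.trans (by simp [pvPair])) hqpx
      · have hpxb1 : pvLtP (x.2.2, x.1) b1 := ((hfacts b1 hlmem).2.1).mpr (by omega)
        have hb1px : b1 ≠ (x.2.2, x.1) := (hfacts b1 hlmem).2.2
        cases ob2 with
        | none =>
          have hlen1 : l.length = 1 := by
            have h := hS2
            simp only [List.length_map] at h
            omega
          obtain ⟨a, hsa⟩ := List.length_eq_one_iff.mp
            (by simp [hlen1] : (l.map pvPair).length = 1)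
          have hb1a : b1 = a := by simpa [hsa] using hlmem
          refine ⟨t + x.2.2, b1, some (x.2.2, x.1), by simp [pvUpdB, h1], ⟨?_, ?_⟩, ?_, ?_, ?_, ?_⟩
          · exact List.mem_append_left _ hlmem
          · intro q hq hqne
            rcases List.mem_append.mp hq with h | h
            · rw [hsa] at h
              simp only [List.mem_singleton] at h
              exact absurd (h.trans hb1a.symm) hqne
            · simp only [List.map_cons, List.map_nil, List.mem_singleton] at h
              rw [h, show pvPair x = (x.2.2, x.1) from rfl]
              exact hpxb1
          · simp [hsa]
          · exact List.mem_append_right _ (by simp [pvPair])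
          · exact Ne.symm hb1px
          · intro q hq hqb1 hqpx
            rcases List.mem_append.mp hq with h | h
            · rw [hsa] at h
              simp only [List.mem_singleton] at h
              exact absurd (h.trans hb1a.symm) hqb1
            · simp only [List.map_cons, List.map_nil, List.mem_singleton] at h
              exact absurd (h.trans (by simp [pvPair])) hqpx
        | some b2 =>
          obtain ⟨hlen2, hb2mem, hb2ne, hb2max⟩ := hS2
          have hlen2' : 2 ≤ l.length := by simpa using hlen2
          by_cases h2 : b2.1 < x.2.2
          · refine ⟨t + x.2.2, b1, some (x.2.2, x.1), by simp [pvUpdB, h1, h2], ⟨?_, ?_⟩, ?_, ?_, ?_, ?_⟩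
            · exact List.mem_append_left _ hlmem
            · intro q hq hqne
              rcases List.mem_append.mp hq with h | h
              · exact hb1max q h hqne
              · simp only [List.map_cons, List.map_nil, List.mem_singleton] at h
                rw [h, show pvPair x = (x.2.2, x.1) from rfl]
                exact hpxb1
            · simp only [List.length_append, List.map_cons, List.map_nil, List.length_cons,
                List.length_nil]
              omega
            · exact List.mem_append_right _ (by simp [pvPair])
            · exact Ne.symm hb1px
            · intro q hq hqb1 hqpx
              rcases List.mem_append.mp hq with h | h
              · by_cases hqb2 : q = b2
                · subst hqb2; exact ((hfacts q h).1).mpr h2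
                · exact pv_ltP_trans (hb2max q h hqb1 hqb2) (((hfacts b2 hb2mem).1).mpr h2)
              · simp only [List.map_cons, List.map_nil, List.mem_singleton] at h
                exact absurd (h.trans (by simp [pvPair])) hqpx
          · have hpxb2 : pvLtP (x.2.2, x.1) b2 := ((hfacts b2 hb2mem).2.1).mpr (by omega)
            refine ⟨t + x.2.2, b1, some b2, by simp [pvUpdB, h1, h2], ⟨?_, ?_⟩, ?_, ?_, ?_, ?_⟩
            · exact List.mem_append_left _ hlmem
            · intro q hq hqne
              rcases List.mem_append.mp hq with h | h
              · exact hb1max q h hqne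
              · simp only [List.map_cons, List.map_nil, List.mem_singleton] at h
                rw [h, show pvPair x = (x.2.2, x.1) from rfl]
                exact hpxb1
            · simp only [List.length_append, List.map_cons, List.map_nil, List.length_cons,
                List.length_nil]
              omega
            · exact List.mem_append_left _ hb2mem
            · exact hb2ne
            · intro q hq hqb1 hqb2
              rcases List.mem_append.mp hq with h | h
              · exact hb2max q h hqb1 hqb2
              · simp only [List.map_cons, List.map_nil, List.mem_singleton] at h
                rw [h, show pvPair x = (x.2.2, x.1) from rfl]
                exact hpxb2

lemma pv_take2_of_spec (s D : List (Int × Int)) (hperm : D.Perm s) (hnd : s.Nodup)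
    (hpw : List.Pairwise (fun a b => pvLtP b a) D) (b1 : Int × Int) (ob2 : Option (Int × Int))
    (hspec : pvSpecTop s b1 ob2) :
    D.take 2 = b1 :: (match ob2 with | none => [] | some b2 => [b2]) := by
  obtain ⟨⟨hb1mem, hb1max⟩, hS2⟩ := hspec
  cases D with
  | nil =>
    exact absurd (hperm.symm.eq_nil ▸ hb1mem) (List.not_mem_nil)
  | cons m Dt =>
    have hms : m ∈ s := hperm.subset List.mem_cons_self
    have hm_max : ∀ q ∈ s, q ≠ m → pvLtP q m := by
      intro q hq hqm
      have hqD : q ∈ m :: Dt := hperm.mem_iff.mpr hq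
      rcases List.mem_cons.mp hqD with h | h
      · exact absurd h hqm
      · exact (List.pairwise_cons.mp hpw).1 q h
    have hb1 : b1 = m := pv_max_unique s b1 m hb1mem hms hb1max hm_max
    subst hb1
    cases Dt with
    | nil =>
      have hlen : s.length = 1 := by simpa using hperm.length_eq.symm
      cases ob2 with
      | none => simp
      | some b2 => exact absurd hS2.1 (by omega)
    | cons m2 Dt2 =>
      have hlen : 2 ≤ s.length := by
        have := hperm.length_eq
        simp at this
        omega
      cases ob2 with
      | none => exact absurd hS2 (by omega)
      | some b2 =>
        obtain ⟨_, hb2mem, hb2ne, hb2max⟩ := hS2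
        have hDt : Dt2.length + 1 = (s.erase b1).length ∧ (m2 :: Dt2).Perm (s.erase b1) := by
          have h := (List.cons_perm_iff_perm_erase.mp hperm).2
          exact ⟨by simpa using h.length_eq, h⟩
        have hm2e : m2 ∈ s.erase b1 := hDt.2.subset List.mem_cons_self
        have hb2e : b2 ∈ s.erase b1 := (hnd.mem_erase_iff).mpr ⟨hb2ne, hb2mem⟩
        have hprop_b2 : ∀ q ∈ s.erase b1, q ≠ b2 → pvLtP q b2 := by
          intro q hq hqb2
          obtain ⟨hqb1, hqs⟩ := (hnd.mem_erase_iff).mp hq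
          exact hb2max q hqs hqb1 hqb2
        have hprop_m2 : ∀ q ∈ s.erase b1, q ≠ m2 → pvLtP q m2 := by
          intro q hq hqm2
          have hqD : q ∈ m2 :: Dt2 := hDt.2.mem_iff.mpr hq
          rcases List.mem_cons.mp hqD with h | h
          · exact absurd h hqm2
          · exact (List.pairwise_cons.mp (List.pairwise_cons.mp hpw).2).1 q h
        have : b2 = m2 := pv_max_unique (s.erase b1) b2 m2 hb2e hm2e hprop_b2 hprop_m2
        subst this
        simp

-- pvDesc facts
lemma pv_desc_perm (l : List (Int × String × Int)) : (pvDesc l).Perm l := by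
  exact (PySem.List.sorted l pvKP).reverse_perm.trans (PySem.List.sorted_perm l pvKP false)

lemma pv_desc_pairwise (l : List (Int × String × Int))
    (h : List.Pairwise (fun a b => pvKP a ≠ pvKP b) l) :
    List.Pairwise (fun a b => pvKP b < pvKP a) (pvDesc l) := by
  have hle := PySem.List.sorted_pairwise l pvKP
  have hne : List.Pairwise (fun a b => pvKP a ≠ pvKP b) (PySem.List.sorted l pvKP) :=
    (List.Perm.pairwise_iff (fun h => Ne.symm h) (PySem.List.sorted_perm l pvKP false)).mpr h
  unfold pvDesc
  rw [List.pairwise_reverse]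
  exact (hle.and hne).imp (fun h => lt_of_le_of_ne h.1 h.2)

-- genre partition
lemma pv_partition_perm (gs : List String) (l : List (Int × String × Int)) (hnd : gs.Nodup)
    (hcov : ∀ x ∈ l, x.2.1 ∈ gs) : (gs.flatMap (fun g => pvBucket l g)).Perm l := by
  induction gs generalizing l with
  | nil =>
    have : l = [] := List.eq_nil_iff_forall_not_mem.mpr (fun x hx => by simpa using hcov x hx)
    simp [this]
  | cons g gs ih =>
    have hgns : g ∉ gs := (List.nodup_cons.mp hnd).1
    have hb : ∀ g' ∈ gs, pvBucket l g'
        = pvBucket (l.filter (fun x => !(x.2.1 == g))) g' := by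
      intro g' hg'
      unfold pvBucket
      rw [List.filter_filter]
      apply List.filter_congr
      intro x hx
      by_cases h : x.2.1 = g'
      · have hne : x.2.1 ≠ g := fun hh => hgns ((hh.symm.trans h) ▸ hg')
        have hgg : g' ≠ g := fun hh => hgns (hh ▸ hg')
        simp [h, hgg]
      · simp [h]
    have ihl := ih (l.filter (fun x => !(x.2.1 == g))) (List.nodup_cons.mp hnd).2
      (fun x hx => by
        rcases List.mem_filter.mp hx with ⟨hxl, hpx⟩
        rcases List.mem_cons.mp (hcov x hxl) with h | h
        · exfalso; simp [h] at hpx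
        · exact h)
    rw [List.flatMap_cons, List.flatMap_def, List.map_congr_left hb, ← List.flatMap_def]
    unfold pvBucket
    exact (List.Perm.append_left _ ihl).trans
      (List.filter_append_perm (fun x => x.2.1 == g) l)

lemma pv_sorted2_eq_sorted_lex {α κ₁ κ₂ : Type} [LinearOrder κ₁] [LinearOrder κ₂]
    (xs : List α) (k1 : α → κ₁) (k2 : α → κ₂) (rev : Bool) :
    PySem.List.sorted2 xs k1 k2 rev = PySem.List.sorted xs (fun a => toLex (k1 a, k2 a)) rev := by
  have hlt : (fun a b : α => (decide (k1 a < k1 b) || (!decide (k1 b < k1 a) && decide (k2 a < k2 b))))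
      = fun a b : α => decide (toLex (k1 a, k2 a) < toLex (k1 b, k2 b)) := by
    funext a b
    rcases lt_trichotomy (k1 a) (k1 b) with h | h | h
    · simp [h, Prod.Lex.toLex_lt_toLex]
    · simp [h, Prod.Lex.toLex_lt_toLex]
    · simp [h, not_lt.mpr h.le, h.ne', Prod.Lex.toLex_lt_toLex]
  unfold PySem.List.sorted2 PySem.List.sorted
  cases rev
  · simp only [Bool.false_eq_true, if_false]
    rw [hlt]
  · simp only [if_pos rfl]
    have hlt' : (fun a b : α => (decide (k1 b < k1 a) || (!decide (k1 a < k1 b) && decide (k2 b < k2 a))))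
        = fun a b : α => decide (toLex (k1 b, k2 b) < toLex (k1 a, k2 a)) := by
      funext a b
      exact congrFun (congrFun hlt b) a
    rw [hlt', hlt]

-- the scan over A's reversed sorted list, one genre block
lemma pv_scan_skip (rest : List (Int × String × Int)) (g : String)
    (s : PySem.Dict String Int) (acc : List Int)
    (hg : ∀ x ∈ rest, x.2.1 = g) (hs : s.get? g = some 2) :
    rest.foldl pvScanStep (s, acc) = (s, acc) := by
  induction rest with
  | nil => rfl
  | cons x t ih =>
    have hx : x.2.1 = g := hg x (List.mem_cons_self)
    have hc : s.contains g = true := by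
      rw [PySem.Dict.contains_eq_isSome_get?, hs]; rfl
    have hd : s.getD g 0 = 2 := by
      rw [PySem.Dict.getD_eq_get?_getD, hs]; rfl
    have hstep : pvScanStep (s, acc) x = (s, acc) := by
      unfold pvScanStep
      simp [hx, hc, hd]
    rw [List.foldl_cons, hstep]
    exact ih (fun y hy => hg y (List.mem_cons_of_mem _ hy))

lemma pv_scan_block (blk : List (Int × String × Int)) (g : String)
    (s : PySem.Dict String Int) (acc : List Int)
    (hne : blk ≠ []) (hg : ∀ x ∈ blk, x.2.1 = g) (hs : s.contains g = false) :
    ∃ s', blk.foldl pvScanStep (s, acc) = (s', acc ++ (blk.take 2).map (·.1)) ∧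
      ∀ g', g' ≠ g → s'.contains g' = s.contains g' := by
  match blk, hne with
  | x :: rest, _ =>
    have hx : x.2.1 = g := hg x (List.mem_cons_self)
    have hstep1 : pvScanStep (s, acc) x = (s.insert g 1, acc ++ [x.1]) := by
      unfold pvScanStep
      simp [hx, hs]
    match rest with
    | [] =>
      refine ⟨s.insert g 1, ?_, ?_⟩
      · simp only [List.foldl_cons, hstep1, List.foldl_nil, List.take, List.map]
      · intro g' hgg'
        rw [PySem.Dict.contains_insert]
        simp [hgg']
    | y :: rest2 =>
      have hy : y.2.1 = g := hg y (List.mem_cons_of_mem _ (List.mem_cons_self))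
      have hstep2 : pvScanStep (s.insert g 1, acc ++ [x.1]) y
          = ((s.insert g 1).insert g 2, (acc ++ [x.1]) ++ [y.1]) := by
        unfold pvScanStep
        have hc : (s.insert g 1).contains g = true := PySem.Dict.contains_insert_self s g 1
        have hd : (s.insert g 1).getD g 0 = 1 := by
          rw [PySem.Dict.getD_eq_get?_getD, PySem.Dict.get?_insert_self]; rfl
        simp [hy, hc, hd]
      have hskip := pv_scan_skip rest2 g ((s.insert g 1).insert g 2) ((acc ++ [x.1]) ++ [y.1])
        (fun z hz => hg z (List.mem_cons_of_mem _ (List.mem_cons_of_mem _ hz)))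
        (PySem.Dict.get?_insert_self _ g 2)
      refine ⟨(s.insert g 1).insert g 2, ?_, ?_⟩
      · simp only [List.foldl_cons, hstep1, hstep2, hskip]
        simp [List.append_assoc]
      · intro g' hgg'
        rw [PySem.Dict.contains_insert, PySem.Dict.contains_insert]
        simp [hgg']

lemma pv_scan_blocks (f : String → List (Int × String × Int)) (gs : List String) :
    ∀ (s : PySem.Dict String Int) (acc : List Int), gs.Nodup →
    (∀ g ∈ gs, s.contains g = false) → (∀ g ∈ gs, f g ≠ []) →
    (∀ g ∈ gs, ∀ x ∈ f g, x.2.1 = g) →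
    ∃ s', ((gs.map f).flatten).foldl pvScanStep (s, acc)
        = (s', acc ++ gs.flatMap (fun g => ((f g).take 2).map (·.1))) ∧
      ∀ g', g' ∉ gs → s'.contains g' = s.contains g' := by
  induction gs with
  | nil => intro s acc _ _ _ _; exact ⟨s, by simp, fun g' _ => rfl⟩
  | cons g gs ih =>
    intro s acc hnd hcont hne hhom
    obtain ⟨s1, h1, hp1⟩ := pv_scan_block (f g) g s acc (hne g List.mem_cons_self)
      (hhom g List.mem_cons_self) (hcont g List.mem_cons_self)
    obtain ⟨s2, h2, hp2⟩ := ih s1 (acc ++ ((f g).take 2).map (·.1)) hnd.of_cons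
      (fun g' hg' => by
        rw [hp1 g' (fun h => (List.nodup_cons.mp hnd).1 (h ▸ hg'))]
        exact hcont g' (List.mem_cons_of_mem _ hg'))
      (fun g' hg' => hne g' (List.mem_cons_of_mem _ hg'))
      (fun g' hg' => hhom g' (List.mem_cons_of_mem _ hg'))
    refine ⟨s2, ?_, ?_⟩
    · rw [List.map_cons, List.flatten_cons, List.foldl_append, h1, h2]
      simp [List.append_assoc]
    · intro g' hg'
      rw [hp2 g' (fun h => hg' (List.mem_cons_of_mem _ h)),
        hp1 g' (fun h => hg' (h ▸ List.mem_cons_self))]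

-- the main sort decomposition
lemma pv_sort_decomp (Z : List (String × Int)) :
    (PySem.List.sorted (PySem.List.enumerate Z) (pvKeyA (pvRankDict Z))).reverse
      = (PySem.List.sorted (PySem.Set.ofList (Z.map (·.1)))
          (fun g => toLex ((pvRankDict Z).getD g 0, g)) true).flatMap
          (fun g => pvDesc (pvBucket (PySem.List.enumerate Z) g)) := by
  set items := PySem.List.enumerate Z 0 with hitems
  set rank := pvRankDict Z with hrank
  set G := PySem.Set.ofList (Z.map (·.1)) with hG
  set gstar := PySem.List.sorted G (fun g => toLex (rank.getD g 0, g)) true with hgstar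
  have hmapg : items.map (fun x => x.2.1) = Z.map (·.1) := by
    have h := pv_enum_map_snd Z 0
    calc items.map (fun x => x.2.1) = (items.map (·.2)).map (·.1) := by
          rw [List.map_map]; rfl
      _ = Z.map (·.1) := by rw [h]
  have hGnd : G.Nodup := PySem.Set.nodup_ofList _
  have hgperm : gstar.Perm G := PySem.List.sorted_perm G _ true
  have hgnd : gstar.Nodup := (hgperm.nodup_iff).mpr hGnd
  have hgpw : List.Pairwise
      (fun a b => (toLex (rank.getD b 0, b) : Lex (Int × String)) < toLex (rank.getD a 0, a))
      gstar := by
    have hle := PySem.List.sorted_pairwise_rev G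
      (fun g => (toLex (rank.getD g 0, g) : Lex (Int × String)))
    have hnd' : List.Pairwise (· ≠ ·) gstar := hgnd
    exact (hle.and hnd').imp (fun h => lt_of_le_of_ne h.1
      (fun he => h.2 (congrArg Prod.snd (toLex_inj.mp he)).symm))
  have hgenre : ∀ g, ∀ x ∈ pvDesc (pvBucket items g), x.2.1 = g := by
    intro g x hx
    have hx' := (pv_desc_perm (pvBucket items g)).mem_iff.mp hx
    simpa using (List.mem_filter.mp hx').2
  have hbpw : ∀ g, List.Pairwise (fun a b => pvKP b < pvKP a) (pvDesc (pvBucket items g)) := by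
    intro g
    apply pv_desc_pairwise
    have hidx : List.Pairwise (fun a b => a.1 < b.1) (pvBucket items g) :=
      List.Pairwise.sublist List.filter_sublist (pv_enum_idx_pairwise Z 0)
    refine hidx.imp ?_
    intro a b h hkp
    have h2 : -a.1 = -b.1 := congrArg (fun q => (ofLex q).2) hkp
    omega
  have hcov : ∀ x ∈ items, x.2.1 ∈ G := by
    intro x hx
    rw [hG]
    refine (PySem.Set.mem_ofList _ _).mpr ?_
    rw [← hmapg]
    exact List.mem_map_of_mem hx
  have hperm1 : (gstar.flatMap (fun g => pvDesc (pvBucket items g))).Perm items :=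
    (List.Perm.flatMap hgperm (fun g _ => pv_desc_perm _)).trans
      (pv_partition_perm G items hGnd hcov)
  have hpw : List.Pairwise (fun a b => pvKeyA rank a < pvKeyA rank b)
      ((gstar.flatMap (fun g => pvDesc (pvBucket items g))).reverse) := by
    rw [List.pairwise_reverse, List.flatMap_def, List.pairwise_flatten]
    constructor
    · intro bl hbl
      obtain ⟨g, hg, rfl⟩ := List.mem_map.mp hbl
      refine List.Pairwise.imp_of_mem ?_ (hbpw g)
      intro a b ha hb hr
      have hga := hgenre g a ha
      have hgb := hgenre g b hb
      show pvKeyA rank b < pvKeyA rank a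
      unfold pvKeyA
      rw [hga, hgb]
      exact Prod.Lex.toLex_lt_toLex.mpr
        (Or.inr ⟨rfl, Prod.Lex.toLex_lt_toLex.mpr (Or.inr ⟨rfl, hr⟩)⟩)
    · rw [List.pairwise_map]
      refine hgpw.imp ?_
      intro g1 g2 hlt x hx y hy
      have hgx := hgenre g1 x hx
      have hgy := hgenre g2 y hy
      show pvKeyA rank y < pvKeyA rank x
      unfold pvKeyA
      rw [hgx, hgy]
      rcases Prod.Lex.toLex_lt_toLex.mp hlt with h | ⟨h1, h2⟩
      · exact Prod.Lex.toLex_lt_toLex.mpr (Or.inl h)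
      · exact Prod.Lex.toLex_lt_toLex.mpr
          (Or.inr ⟨h1, Prod.Lex.toLex_lt_toLex.mpr (Or.inl h2)⟩)
  have hmain := PySem.List.sorted_eq_of_perm_of_pairwise_lt items
    ((gstar.flatMap (fun g => pvDesc (pvBucket items g))).reverse) (pvKeyA rank)
    ((gstar.flatMap (fun g => pvDesc (pvBucket items g))).reverse_perm.trans hperm1) hpw
  rw [hmain, List.reverse_reverse]

-- assembling both programs to the common normal form
lemma pv_bucket_ne (Z : List (String × Int)) (g : String)
    (hg : g ∈ PySem.Set.ofList (Z.map (·.1))) :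
    pvBucket (PySem.List.enumerate Z) g ≠ [] := by
  have hmapg : (PySem.List.enumerate Z 0).map (fun x => x.2.1) = Z.map (·.1) := by
    have h := pv_enum_map_snd Z 0
    calc (PySem.List.enumerate Z 0).map (fun x => x.2.1)
        = ((PySem.List.enumerate Z 0).map (·.2)).map (·.1) := by rw [List.map_map]; rfl
      _ = Z.map (·.1) := by rw [h]
    
  have hg' : g ∈ (PySem.List.enumerate Z 0).map (fun x => x.2.1) := by
    rw [hmapg]
    exact (PySem.Set.mem_ofList _ _).mp hg
  obtain ⟨x, hx, hxg⟩ := List.mem_map.mp hg'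
  have : x ∈ pvBucket (PySem.List.enumerate Z) g :=
    List.mem_filter.mpr ⟨hx, by simp [hxg]⟩
  exact List.ne_nil_of_mem this

lemma pv_desc_ne (l : List (Int × String × Int)) (h : l ≠ []) : pvDesc l ≠ [] := by
  intro hnil
  have hp := pv_desc_perm l
  rw [hnil] at hp
  exact h (hp.symm.eq_nil)

lemma pv_solution_eq (genres : List String) (plays : List Int) :
    solution genres plays
      = (PySem.List.sorted (PySem.Set.ofList (((genres.zip plays)).map (·.1)))
          (fun g => toLex ((pvRankDict (genres.zip plays)).getD g 0, g)) true).flatMap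
          (fun g =>
            ((pvDesc (pvBucket (PySem.List.enumerate (genres.zip plays)) g)).take 2).map (·.1)) := by
  show ((PySem.List.sorted (PySem.List.enumerate (genres.zip plays))
      (pvKeyA (pvRankDict (genres.zip plays)))).reverse.foldl pvScanStep
        (PySem.Dict.empty, [])).2 = _
  rw [pv_sort_decomp]
  set Z := genres.zip plays with hZ
  set items := PySem.List.enumerate Z 0 with hitems
  set G := PySem.Set.ofList (Z.map (·.1)) with hG
  set gstar := PySem.List.sorted G (fun g => toLex ((pvRankDict Z).getD g 0, g)) true
    with hgstar
  have hgnd : gstar.Nodup :=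
    ((PySem.List.sorted_perm G _ true).nodup_iff).mpr (PySem.Set.nodup_ofList _)
  obtain ⟨s', hfold, _⟩ := pv_scan_blocks (fun g => pvDesc (pvBucket items g)) gstar
    PySem.Dict.empty [] hgnd
    (fun g _ => PySem.Dict.contains_empty g)
    (fun g hg => pv_desc_ne _ (pv_bucket_ne Z g ((PySem.List.sorted_perm G _ true).subset hg)))
    (fun g _ x hx => by
      have hx' := (pv_desc_perm (pvBucket items g)).mem_iff.mp hx
      simpa using (List.mem_filter.mp hx').2)
  rw [List.flatMap_def, hfold]
  simp [List.flatMap_def]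

lemma pv_alt_eq (genres : List String) (plays : List Int) :
    solution_alt genres plays
      = (PySem.List.sorted (PySem.Set.ofList (((genres.zip plays)).map (·.1)))
          (fun g => toLex ((pvRankDict (genres.zip plays)).getD g 0, g)) true).flatMap
          (fun g =>
            ((pvDesc (pvBucket (PySem.List.enumerate (genres.zip plays)) g)).take 2).map (·.1)) := by
  set Z := genres.zip plays with hZ
  set items := PySem.List.enumerate Z 0 with hitems
  set info := items.foldl pvStepB PySem.Dict.empty with hinfo
  show (PySem.List.sorted2 info.keys (fun g => (info.getD g pvB0).1) (fun g => g) true).foldl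
      (fun acc g =>
        acc ++ [(info.getD g pvB0).2.1.2] ++
          (match (info.getD g pvB0).2.2 with | none => [] | some b2 => [b2.2])) [] = _
  have hmapg : items.map (fun x => x.2.1) = Z.map (·.1) := by
    have h := pv_enum_map_snd Z 0
    calc items.map (fun x => x.2.1) = (items.map (·.2)).map (·.1) := by rw [List.map_map]; rfl
      _ = Z.map (·.1) := by rw [h]
  have hkeys : info.keys = PySem.Set.ofList (Z.map (·.1)) := by
    rw [hinfo, pv_info_keys, hmapg]
  have hk1 : (fun g => (info.getD g pvB0).1) = fun g => (pvRankDict Z).getD g 0 :=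
    funext (fun g => pv_tot_eq Z g)
  rw [hkeys, hk1, pv_sorted2_eq_sorted_lex]
  set G := PySem.Set.ofList (Z.map (·.1)) with hG
  set gstar := PySem.List.sorted G (fun g => toLex ((pvRankDict Z).getD g 0, g)) true
    with hgstar
  rw [PySem.List.foldl_congr_mem gstar _
    (fun acc g =>
      acc ++ ([(info.getD g pvB0).2.1.2] ++
        (match (info.getD g pvB0).2.2 with | none => [] | some b2 => [b2.2]))) []
    (fun acc g _ => List.append_assoc acc _ _)]
  rw [PySem.List.foldl_append_eq_flatMap]
  rw [List.nil_append, List.flatMap_def, List.flatMap_def]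
  congr 1
  apply List.map_congr_left
  intro g hg
  have hgG : g ∈ G := (PySem.List.sorted_perm G _ true).subset hg
  have hbne : pvBucket items g ≠ [] := pv_bucket_ne Z g hgG
  have hidx : List.Pairwise (fun a b => a.1 < b.1) (pvBucket items g) :=
    List.Pairwise.sublist List.filter_sublist (pv_enum_idx_pairwise Z 0)
  obtain ⟨t, b1, ob2, hfold, hspec⟩ := pv_top2_fold (pvBucket items g) hidx hbne
  have hget : info.get? g = some (t, b1, ob2) := by
    rw [hinfo, pv_info_get?]
    exact hfold
  have hgetD : info.getD g pvB0 = (t, b1, ob2) :=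
    PySem.Dict.getD_of_get?_eq_some info pvB0 hget
  have hndp : (List.map pvPair (pvBucket items g)).Nodup := by
    refine List.pairwise_map.mpr (hidx.imp ?_)
    intro a b h heq
    have h2 : a.1 = b.1 := congrArg (·.2) heq
    omega
  have hpwD : List.Pairwise (fun a b => pvLtP b a)
      ((pvDesc (pvBucket items g)).map pvPair) := by
    refine List.pairwise_map.mpr ?_
    have hkpne : List.Pairwise (fun a b => pvKP a ≠ pvKP b) (pvBucket items g) := by
      refine hidx.imp ?_
      intro a b h hkp
      have h2 : -a.1 = -b.1 := congrArg (fun q => (ofLex q).2) hkp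
      omega
    exact (pv_desc_pairwise _ hkpne).imp (fun h => h)
  have hD := pv_take2_of_spec (List.map pvPair (pvBucket items g))
      (List.map pvPair (pvDesc (pvBucket items g)))
      ((pv_desc_perm _).map pvPair) hndp hpwD b1 ob2 hspec
  rw [hgetD]
  have hmt : ((pvDesc (pvBucket items g)).take 2).map (·.1)
      = ((List.map pvPair (pvDesc (pvBucket items g))).take 2).map (·.2) := by
    rw [← List.map_take, List.map_map]
    rfl
  rw [hmt, hD]
  cases ob2 <;> simp

-- ===== VERDICT (by name: the statement is the Claim_ definition above) =====
theorem solution_spec : Claim_equal_solution := by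
  intro genres plays _
  unfold Spec_solution
  rw [pv_solution_eq, pv_alt_eq]
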